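-- pv_equiv track=rewrite | github.com/clara-knight/CS131 | src/P3.py | brute_force_weights
-- ===== SOURCE A (Python) =====
-- def brute_force_weights(weight_combinations, capacity):
--     # We start with a max weight sum = 0 and an empty list of weight combinations.
--     max_w_sum = 0
--     best_subsets = []
--     for w_subset in weight_combinations:
--         # Iterate through every subset of the weight combinations and obtain
--         # the sum of the weights
--         subset_weight = sum(w_subset)
--         if subset_weight <= capacity:
--             # If the sum of weights is less than capacity, compare with the largest
--             # subset we have found so far.
--             if subset_weight > max_w_sum:
--                 # If it's greater than, replace previous
--                 # largest subset with the newest largest subset found.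
--                 max_w_sum = subset_weight
--                 best_subsets = [w_subset]
--             elif subset_weight == max_w_sum:
--                 # If the weight of the new subset is the same as the largest subset(s) found
--                 # so far, append that to the list.
--                 best_subsets.append(w_subset)
--     return best_subsets
-- ===== SOURCE B (Python) =====
-- def brute_force_weights(weight_combinations, capacity):
--     # Two-pass: collect valid sums, clamp the target at 0 (mirrors A's 0 baseline),
--     # then select in original order every valid subset hitting the target.
--     valid_sums = [sum(s) for s in weight_combinations if sum(s) <= capacity]
--     target = max([0] + valid_sums)
--     return [s for s in weight_combinations
--             if sum(s) <= capacity and sum(s) == target]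
-- ===== Notes on version B (the rewrite author's own statement) =====
-- stated objective: simpler
-- what changed: Replaces A's single online max-with-ties pass (mutable running max plus reset/append list) by a compute-then-select two-pass: gather valid sums, take target = max(0, valid sums), then filter the subsets equal to the target.
import Mathlib
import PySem

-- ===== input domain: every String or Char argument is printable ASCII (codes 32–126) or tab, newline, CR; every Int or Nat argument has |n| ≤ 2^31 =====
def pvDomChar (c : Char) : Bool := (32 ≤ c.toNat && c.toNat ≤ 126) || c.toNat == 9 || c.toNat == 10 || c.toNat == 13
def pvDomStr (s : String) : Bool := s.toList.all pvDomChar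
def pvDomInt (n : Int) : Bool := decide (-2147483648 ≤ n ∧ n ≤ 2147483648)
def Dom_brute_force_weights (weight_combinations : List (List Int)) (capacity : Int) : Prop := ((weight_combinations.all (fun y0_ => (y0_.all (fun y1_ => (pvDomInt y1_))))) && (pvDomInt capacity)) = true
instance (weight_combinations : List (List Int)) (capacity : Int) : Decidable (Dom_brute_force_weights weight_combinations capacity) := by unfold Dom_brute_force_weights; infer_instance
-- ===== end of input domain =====

-- B replaces A's online max-with-ties pass by a two-pass compute-target-then-filter; same result, simpler (objective: simpler).


-- ===== PORT A =====
-- one loop iteration of A: state = (max_w_sum, best_subsets)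
def bfwStepA (capacity : Int) (st : Int × List (List Int)) (w_subset : List Int) :
    Int × List (List Int) :=
  let subset_weight := w_subset.sum
  if subset_weight ≤ capacity then
    if subset_weight > st.1 then (subset_weight, [w_subset])
    else if subset_weight = st.1 then (st.1, st.2 ++ [w_subset])
    else st
  else st

def brute_force_weights (weight_combinations : List (List Int)) (capacity : Int) : List (List Int) :=
  (weight_combinations.foldl (bfwStepA capacity) (0, [])).2

-- ===== PORT B =====
def brute_force_weights_alt (weight_combinations : List (List Int)) (capacity : Int) : List (List Int) :=
  let valid_sums := (weight_combinations.map (·.sum)).filter (fun w => decide (w ≤ capacity))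
  let target := ((0 : Int) :: valid_sums).foldl max 0
  weight_combinations.filter (fun s => decide (s.sum ≤ capacity) && decide (s.sum = target))

-- ===== PRECONDITION & SPEC =====
def Spec_brute_force_weights (weight_combinations : List (List Int)) (capacity : Int) (out : List (List Int)) : Prop := out = brute_force_weights_alt weight_combinations capacity
instance (weight_combinations : List (List Int)) (capacity : Int) (out : List (List Int)) : Decidable (Spec_brute_force_weights weight_combinations capacity out) := by unfold Spec_brute_force_weights; infer_instance

-- ===== CLAIM (what is proved, stated in full; the proofs are below) =====
def Claim_equal_brute_force_weights : Prop := ∀ (weight_combinations : List (List Int)) (capacity : Int), Dom_brute_force_weights weight_combinations capacity → Spec_brute_force_weights weight_combinations capacity (brute_force_weights weight_combinations capacity)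

-- ===== LEMMAS AND PROOFS =====

-- running max of the valid sums of l starting from m
def bfwMax (capacity : Int) (l : List (List Int)) (m : Int) : Int :=
  ((l.map (·.sum)).filter (fun w => decide (w ≤ capacity))).foldl max m

theorem bfwMax_ge (capacity : Int) (l : List (List Int)) (m : Int) :
    m ≤ bfwMax capacity l m := by
  induction l generalizing m with
  | nil => simp [bfwMax]
  | cons w l ih =>
    simp only [bfwMax, List.map_cons, List.filter_cons]
    split
    · exact le_trans (le_max_left m w.sum) (ih (max m w.sum))
    · exact ih m

theorem bfwFold_char (capacity : Int) (l : List (List Int)) (m : Int) (b : List (List Int)) :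
    l.foldl (bfwStepA capacity) (m, b) =
      (bfwMax capacity l m,
       (if bfwMax capacity l m = m then b else []) ++
         l.filter (fun s => decide (s.sum ≤ capacity) && decide (s.sum = bfwMax capacity l m))) := by
  induction l generalizing m b with
  | nil => simp [bfwMax]
  | cons w l ih =>
    have hM : ∀ m' : Int, bfwMax capacity (w :: l) m' =
        if w.sum ≤ capacity then bfwMax capacity l (max m' w.sum) else bfwMax capacity l m' := by
      intro m'
      by_cases h : w.sum ≤ capacity <;>
        simp [bfwMax, h]
    simp only [List.foldl_cons, bfwStepA]
    by_cases hc : w.sum ≤ capacity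
    · rw [if_pos hc]
      by_cases hgt : w.sum > m
      · rw [if_pos hgt, ih]
        have hmax : max m w.sum = w.sum := max_eq_right (le_of_lt hgt)
        have hMv : bfwMax capacity (w :: l) m = bfwMax capacity l w.sum := by
          rw [hM m, if_pos hc, hmax]
        rw [hMv]
        have hMn : bfwMax capacity l w.sum ≠ m := by
          have := bfwMax_ge capacity l w.sum; omega
        rw [if_neg hMn, List.filter_cons]
        by_cases he : w.sum = bfwMax capacity l w.sum
        · simp [hc, ← he]
        · simp [hc, he, Ne.symm he]
      · rw [if_neg hgt]
        have hle : w.sum ≤ m := not_lt.mp hgt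
        have hMv : bfwMax capacity (w :: l) m = bfwMax capacity l m := by
          rw [hM m, if_pos hc, max_eq_left hle]
        rw [hMv]
        by_cases heq : w.sum = m
        · rw [if_pos heq, ih, List.filter_cons]
          by_cases hMm : bfwMax capacity l m = m
          · have hc' : m ≤ capacity := heq ▸ hc
            simp [hMm, heq, hc']
          · have hne : w.sum ≠ bfwMax capacity l m := by rw [heq]; exact fun h => hMm h.symm
            simp [hMm, hne]
        · rw [if_neg heq, ih, List.filter_cons]
          have hne : w.sum ≠ bfwMax capacity l m := by
            have := bfwMax_ge capacity l m; omega
          simp [hne]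
    · rw [if_neg hc, ih, List.filter_cons]
      have hMv : bfwMax capacity (w :: l) m = bfwMax capacity l m := by rw [hM m, if_neg hc]
      rw [hMv]
      simp [hc]

-- ===== VERDICT (by name: the statement is the Claim_ definition above) =====
theorem brute_force_weights_spec : Claim_equal_brute_force_weights := by
  intro wcs cap _
  unfold Spec_brute_force_weights brute_force_weights brute_force_weights_alt
  have htgt : ((0 : Int) :: (wcs.map (·.sum)).filter (fun w => decide (w ≤ cap))).foldl max 0
      = bfwMax cap wcs 0 := by
    simp [bfwMax, List.foldl_cons]
  rw [bfwFold_char cap wcs 0 []]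
  simp only [htgt]
  split <;> simp
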